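-- pv_equiv track=rewrite | github.com/Jstambaugh00/BCH394P | Practice Problems/IdentifyingDNA.py | countGC
-- ===== SOURCE A (Python) =====
-- def countGC(string):
--     count =0
--     le=0
--     for i in string:
--         le+=1
--         if i == 'G' or i == 'C':
--             count+=1
--     return count,le
-- ===== SOURCE B (Python) =====
-- def countGC(string):
--     # Divide-and-conquer: split the string in half, solve each half
--     # recursively, and add the (gc, length) pairs.
--     if len(string) == 0:
--         return 0, 0
--     if len(string) == 1:
--         return (1 if string == 'G' or string == 'C' else 0), 1
--     m = len(string) // 2
--     c1, l1 = countGC(string[:m])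
--     c2, l2 = countGC(string[m:])
--     return c1 + c2, l1 + l2
-- ===== Notes on version B (the rewrite author's own statement) =====
-- stated objective: alternative
-- what changed: Replaces A's single left-to-right accumulation loop by a divide-and-conquer recursion that splits the string in half, solves each half, and adds the (gc, length) pairs.
import Mathlib
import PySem

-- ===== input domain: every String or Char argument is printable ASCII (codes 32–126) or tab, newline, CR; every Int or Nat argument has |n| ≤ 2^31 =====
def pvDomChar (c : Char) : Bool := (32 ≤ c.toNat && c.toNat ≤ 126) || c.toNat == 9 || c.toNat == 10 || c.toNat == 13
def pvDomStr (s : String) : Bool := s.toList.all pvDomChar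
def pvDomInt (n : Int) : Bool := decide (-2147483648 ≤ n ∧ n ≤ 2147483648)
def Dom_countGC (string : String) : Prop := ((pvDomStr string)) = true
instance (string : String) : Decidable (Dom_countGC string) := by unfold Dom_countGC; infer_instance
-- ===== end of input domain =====

-- B replaces A's single accumulation loop by a divide-and-conquer recursion on string halves (alternative decomposition, not faster).

-- ===== PORT A =====
-- for i in string: le += 1; if i == 'G' or i == 'C': count += 1
def countGC (string : String) : Int × Int :=
  let st := string.toList.foldl
    (fun (p : Int × Int) i =>
      let le := p.2 + 1
      let count := if i == 'G' || i == 'C' then p.1 + 1 else p.1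
      (count, le))
    (0, 0)
  (st.1, st.2)

-- ===== PORT B =====
-- recursion on halves; string[:m] / string[m:] on 0 ≤ m ≤ len are take/drop
def gcRec (cs : List Char) : Int × Int :=
  match cs with
  | [] => (0, 0)
  | [c] => ((if c == 'G' || c == 'C' then 1 else 0), 1)
  | c₀ :: c₁ :: t =>
    let cs' := c₀ :: c₁ :: t
    let m := cs'.length / 2
    let p1 := gcRec (cs'.take m)
    let p2 := gcRec (cs'.drop m)
    (p1.1 + p2.1, p1.2 + p2.2)
termination_by cs.length
decreasing_by
  · simp [List.length_take]; omega
  · simp; omega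

def countGC_alt (string : String) : Int × Int := gcRec string.toList

-- ===== PRECONDITION & SPEC =====
def Spec_countGC (string : String) (out : Int × Int) : Prop := out = countGC_alt string
instance (string : String) (out : Int × Int) : Decidable (Spec_countGC string out) := by unfold Spec_countGC; infer_instance

-- ===== CLAIM =====
def Claim_equal_countGC : Prop := ∀ (string : String), Dom_countGC string → Spec_countGC string (countGC string)

-- ===== LEMMAS AND PROOFS =====

theorem gcRec_closed (cs : List Char) :
    gcRec cs = ((cs.count 'G' : Int) + (cs.count 'C' : Int), (cs.length : Int)) := by
  induction cs using gcRec.induct with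
  | case1 => simp [gcRec]
  | case2 c => by_cases hG : c = 'G' <;> by_cases hC : c = 'C' <;> simp_all [gcRec]
  | case3 c₀ c₁ t cs' m ih1 ih2 =>
    have hcs : cs' = c₀ :: c₁ :: t := rfl
    have hm : m = cs'.length / 2 := rfl
    rw [hcs] at hm
    rw [hcs, hm] at ih1 ih2
    rw [gcRec, ih1, ih2]
    have h := List.take_append_drop ((c₀ :: c₁ :: t).length / 2) (c₀ :: c₁ :: t)
    have hc : ∀ x : Char,
        ((c₀ :: c₁ :: t).take ((c₀ :: c₁ :: t).length / 2)).count x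
        + ((c₀ :: c₁ :: t).drop ((c₀ :: c₁ :: t).length / 2)).count x
        = (c₀ :: c₁ :: t).count x := by
      intro x
      conv_rhs => rw [← h, List.count_append]
    have hl :
        ((c₀ :: c₁ :: t).take ((c₀ :: c₁ :: t).length / 2)).length
        + ((c₀ :: c₁ :: t).drop ((c₀ :: c₁ :: t).length / 2)).length
        = (c₀ :: c₁ :: t).length := by
      conv_rhs => rw [← h, List.length_append]
    have hG := hc 'G'; have hC := hc 'C'
    simp only [Prod.mk.injEq]
    constructor <;> omega

theorem fold_invariant (cs : List Char) (a b : Int) :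
    cs.foldl
      (fun (p : Int × Int) i =>
        let le := p.2 + 1
        let count := if i == 'G' || i == 'C' then p.1 + 1 else p.1
        (count, le))
      (a, b)
    = (a + (cs.count 'G' : Int) + (cs.count 'C' : Int), b + cs.length) := by
  induction cs generalizing a b with
  | nil => simp
  | cons x t ih =>
    simp only [List.foldl_cons, List.count_cons, List.length_cons]
    rw [ih]
    by_cases hG : x = 'G'
    · subst hG; simp; omega
    · by_cases hC : x = 'C'
      · subst hC; simp; omega
      · simp [hG, hC]; omega

-- ===== VERDICT =====
theorem countGC_spec : Claim_equal_countGC := by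
  intro s _
  unfold Spec_countGC countGC countGC_alt
  rw [fold_invariant, gcRec_closed]
  simp
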